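-- pv_equiv track=rewrite | github.com/Constellab/gws_omix | src/gws_omix/biomath_cacul/gc_content_calculator/_gc_content_calculator.py | rolling_dinuc_counts
-- ===== SOURCE A (Python) =====
-- from typing import List, Tuple, Dict
--
-- def rolling_dinuc_counts(seq: str, win: int, dinuc: str) -> List[int]:
--     """Count overlapping dinucleotides within each window."""
--     n = len(seq)
--     if n < win:
--         return [sum(1 for i in range(len(seq)-1) if seq[i:i+2] == dinuc)]
--     hits = [0]*(n-1)
--     for i in range(n-1):
--         if seq[i:i+2] == dinuc:
--             hits[i] = 1
--     k = win - 1
--     out = []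
--     cur = sum(hits[:k])
--     out.append(cur)
--     for i in range(1, (n-1) - k + 1):
--         cur -= hits[i-1]
--         cur += hits[i+k-1]
--         out.append(cur)
--     return out
-- ===== SOURCE B (Python) =====
-- def rolling_dinuc_counts(seq, win, dinuc):
--     n = len(seq)
--     hits = [1 if seq[i:i+2] == dinuc else 0 for i in range(n - 1)]
--     if n < win:
--         return [sum(hits)]
--     pre = [0]
--     for h in hits:
--         pre.append(pre[-1] + h)
--     return [pre[j + win - 1] - pre[j] for j in range(n - win + 1)]
-- ===== Notes on version B (the rewrite author's own statement) =====
-- stated objective: alternative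
-- what changed: Replaces A's incremental running-window sum (subtract the hit leaving, add the hit entering) with a prefix-sum table pre and per-window differences pre[j+win-1]-pre[j].
import Mathlib
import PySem

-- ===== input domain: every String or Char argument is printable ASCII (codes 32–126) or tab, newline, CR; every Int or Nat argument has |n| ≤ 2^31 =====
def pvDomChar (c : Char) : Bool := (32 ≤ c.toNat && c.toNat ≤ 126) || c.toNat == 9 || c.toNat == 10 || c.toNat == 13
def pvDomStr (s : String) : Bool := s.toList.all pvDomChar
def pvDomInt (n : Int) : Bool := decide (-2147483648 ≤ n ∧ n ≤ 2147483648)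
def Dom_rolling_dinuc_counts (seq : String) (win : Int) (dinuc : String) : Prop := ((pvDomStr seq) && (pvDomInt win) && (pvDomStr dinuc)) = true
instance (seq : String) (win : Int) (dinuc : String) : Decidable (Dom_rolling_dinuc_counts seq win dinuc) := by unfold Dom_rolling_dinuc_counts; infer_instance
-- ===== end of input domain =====

-- B replaces A's incremental running-window sum with a prefix-sum table and per-window
-- differences (objective: alternative decomposition, same O(n) cost).

-- ===== PORT A =====
def rolling_dinuc_counts (seq : String) (win : Int) (dinuc : String) : List Int :=
  let l := seq.toList
  let n : Int := (l.length : Int)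
  if n < win then
    -- sum(1 for i in range(len(seq)-1) if seq[i:i+2] == dinuc)
    [(PySem.List.pyRange 0 (n - 1) 1).foldl
      (fun acc i => if PySem.List.slice l (some i) (some (i + 2)) = dinuc.toList then acc + 1 else acc)
      (0 : Int)]
  else
    -- hits = [0]*(n-1); for i in range(n-1): if seq[i:i+2] == dinuc: hits[i] = 1
    let hits := (PySem.List.pyRange 0 (n - 1) 1).foldl
      (fun hs i => if PySem.List.slice l (some i) (some (i + 2)) = dinuc.toList then PySem.List.pySetD hs i 1 else hs)
      (List.replicate (n - 1).toNat (0 : Int))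
    let k := win - 1
    -- cur = sum(hits[:k]); out = [cur]; then the rolling loop
    let cur0 := (PySem.List.slice hits none (some k)).sum
    let st := (PySem.List.pyRange 1 ((n - 1) - k + 1) 1).foldl
      (fun (st : Int × List Int) i =>
        let cur := st.1 - PySem.List.pyGetD hits (i - 1) 0 + PySem.List.pyGetD hits (i + k - 1) 0
        (cur, st.2 ++ [cur]))
      (cur0, [cur0])
    st.2

-- ===== PORT B =====
def rolling_dinuc_counts_alt (seq : String) (win : Int) (dinuc : String) : List Int :=
  let l := seq.toList
  let n : Int := (l.length : Int)
  -- hits = [1 if seq[i:i+2] == dinuc else 0 for i in range(n-1)]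
  let hits := (PySem.List.pyRange 0 (n - 1) 1).map
    (fun i => if PySem.List.slice l (some i) (some (i + 2)) = dinuc.toList then (1 : Int) else 0)
  if n < win then [hits.sum]
  else
    -- pre = [0]; for h in hits: pre.append(pre[-1] + h)
    let pre := hits.foldl (fun p h => p ++ [PySem.List.pyGetD p (-1) 0 + h]) [(0 : Int)]
    -- [pre[j+win-1] - pre[j] for j in range(n-win+1)]
    (PySem.List.pyRange 0 (n - win + 1) 1).map
      (fun j => PySem.List.pyGetD pre (j + win - 1) 0 - PySem.List.pyGetD pre j 0)

-- ===== PRECONDITION & SPEC =====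
-- Pre_ excludes win ≤ 0 except the single input seq = "" with win = 0: on every
-- excluded input A raises IndexError (negative slice/index arithmetic on hits).
def Pre_rolling_dinuc_counts (seq : String) (win : Int) (dinuc : String) : Prop :=
  1 ≤ win ∨ (seq = "" ∧ win = 0)
instance (seq : String) (win : Int) (dinuc : String) : Decidable (Pre_rolling_dinuc_counts seq win dinuc) := by unfold Pre_rolling_dinuc_counts; infer_instance

def pvWitness_rolling_dinuc_counts : String × Int × String := ("ATAT", 2, "AT")

def Spec_rolling_dinuc_counts (seq : String) (win : Int) (dinuc : String) (out : List Int) : Prop := out = rolling_dinuc_counts_alt seq win dinuc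
instance (seq : String) (win : Int) (dinuc : String) (out : List Int) : Decidable (Spec_rolling_dinuc_counts seq win dinuc out) := by unfold Spec_rolling_dinuc_counts; infer_instance

-- ===== CLAIM (what is proved, stated in full; the proofs are below) =====
def Claim_equal_rolling_dinuc_counts : Prop := ∀ (seq : String) (win : Int) (dinuc : String), Dom_rolling_dinuc_counts seq win dinuc → Pre_rolling_dinuc_counts seq win dinuc → Spec_rolling_dinuc_counts seq win dinuc (rolling_dinuc_counts seq win dinuc)

-- ===== LEMMAS AND PROOFS =====

-- fold that sets flagged positions of a zero array = map of the indicator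
theorem pvSetFold (P : Nat → Prop) [DecidablePred P] (m h : Nat) (hm : m ≤ h) :
    (List.range m).foldl (fun hs k => if P k then hs.set k 1 else hs) (List.replicate h (0:Int))
      = (List.range m).map (fun k => if P k then (1:Int) else 0) ++ List.replicate (h - m) 0 := by
  induction m with
  | zero => simp
  | succ m ih =>
    rw [List.range_succ, List.foldl_append, List.foldl_cons, List.foldl_nil,
        ih (by omega)]
    rw [List.map_append]
    have hsplit : List.replicate (h - m) (0:Int) = 0 :: List.replicate (h - (m+1)) 0 := by
      have : h - m = (h - (m+1)) + 1 := by omega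
      rw [this, List.replicate_succ]
    have hlen : ((List.range m).map (fun k => if P k then (1:Int) else 0)).length = m := by simp
    by_cases hp : P m
    · rw [if_pos hp, hsplit, List.set_append_right m 1 (by simp)]
      simp [hp]
    · simp [hp, hsplit]

-- the append-with-pre[-1] loop produces a scan of partial sums
def pvScan (s : Int) : List Int → List Int
  | [] => []
  | h :: t => (s + h) :: pvScan (s + h) t

theorem pvScan_length (hs : List Int) : ∀ s, (pvScan s hs).length = hs.length := by
  induction hs with
  | nil => intro s; rfl
  | cons h t ih => intro s; simp [pvScan, ih]

theorem pvFold_pre (hs : List Int) : ∀ (p : List Int) (hp : p ≠ []),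
    hs.foldl (fun q h => q ++ [PySem.List.pyGetD q (-1) 0 + h]) p = p ++ pvScan (p.getLast hp) hs := by
  induction hs with
  | nil => intro p hp; simp [pvScan]
  | cons h t ih =>
    intro p hp
    rw [List.foldl_cons, PySem.List.pyGetD_neg_one p _ hp,
        ih (p ++ [p.getLast hp + h]) (by simp)]
    simp [pvScan]

theorem pvTakeSucc (hs : List Int) (J : Nat) (h : J < hs.length) :
    (hs.take (J+1)).sum = (hs.take J).sum + hs.getD J 0 := by
  rw [List.take_add_one, List.sum_append, List.getD_eq_getElem hs 0 h]
  simp [List.getElem?_eq_getElem h]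

theorem pvScan_getElem (hs : List Int) : ∀ (s : Int) (i : Nat) (hi : i < hs.length),
    (pvScan s hs)[i]'(by rw [pvScan_length]; exact hi) = s + (hs.take (i+1)).sum := by
  induction hs with
  | nil => intro s i hi; simp at hi
  | cons h t ih =>
    intro s i hi
    cases i with
    | zero => simp [pvScan]
    | succ i =>
      have hi' : i < t.length := by simpa using hi
      have := ih (s + h) i hi'
      simp only [pvScan, List.getElem_cons_succ, this, List.take_succ_cons, List.sum_cons]
      ring

theorem pvPre_getD (hs : List Int) (J : Nat) (hJ : J ≤ hs.length) :
    (0 :: pvScan 0 hs).getD J 0 = (hs.take J).sum := by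
  cases J with
  | zero => simp
  | succ J =>
    have hJ' : J < hs.length := by omega
    rw [List.getD_cons_succ, List.getD_eq_getElem _ 0 (by rw [pvScan_length]; exact hJ'),
        pvScan_getElem hs 0 J hJ']
    simp

-- the rolling loop of A computes prefix-sum differences
theorem pvLoop (hs : List Int) (N W : Nat) (hlen : hs.length = N - 1)
    (hW1 : 1 ≤ W) (hWN : W ≤ N) (k : Int) (hk : k = ((W - 1 : Nat) : Int)) :
    ∀ r, r ≤ N - W →
    (List.range r).foldl
      (fun (st : Int × List Int) (t : Nat) =>
        (st.1 - PySem.List.pyGetD hs ((1 + (t : Int)) - 1) 0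
           + PySem.List.pyGetD hs ((1 + (t : Int)) + k - 1) 0,
         st.2 ++ [st.1 - PySem.List.pyGetD hs ((1 + (t : Int)) - 1) 0
           + PySem.List.pyGetD hs ((1 + (t : Int)) + k - 1) 0]))
      ((hs.take (W - 1)).sum, [(hs.take (W - 1)).sum])
    = ((hs.take (r + W - 1)).sum - (hs.take r).sum,
       (List.range (r + 1)).map (fun J => (hs.take (J + W - 1)).sum - (hs.take J).sum)) := by
  subst hk
  intro r hr
  induction r with
  | zero => simp
  | succ r ih =>
    rw [List.range_succ, List.foldl_append, ih (by omega), List.foldl_cons, List.foldl_nil]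
    have h1 : (1 + (r : Int)) - 1 = ((r : Nat) : Int) := by omega
    have h2 : (1 + (r : Int)) + ((W - 1 : Nat) : Int) - 1 = ((r + W - 1 : Nat) : Int) := by omega
    rw [h1, h2, PySem.List.pyGetD_natCast, PySem.List.pyGetD_natCast]
    have hb1 : r < hs.length := by omega
    have hb2 : r + W - 1 < hs.length := by omega
    have e1 : (hs.take (r + 1)).sum = (hs.take r).sum + hs.getD r 0 := pvTakeSucc hs r hb1
    have e2 : (hs.take (r + 1 + W - 1)).sum = (hs.take (r + W - 1)).sum + hs.getD (r + W - 1) 0 := by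
      have : r + 1 + W - 1 = (r + W - 1) + 1 := by omega
      rw [this, pvTakeSucc hs (r + W - 1) hb2]
    simp only []
    rw [Prod.mk.injEq]
    refine ⟨by rw [e1, e2]; ring, ?_⟩
    conv_rhs => rw [List.range_succ, List.map_append]
    simp only [List.map_cons, List.map_nil]
    congr 2
    rw [e1, e2]; ring

-- else-branch of A equals else-branch of B (main case: 1 ≤ W ≤ len)
theorem pvMain (l d : List Char) (W : Nat) (hW1 : 1 ≤ W) (hWN : W ≤ l.length) :
    (let n : Int := (l.length : Int)
     let hits := (PySem.List.pyRange 0 (n - 1) 1).foldl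
       (fun hs i => if PySem.List.slice l (some i) (some (i + 2)) = d then PySem.List.pySetD hs i 1 else hs)
       (List.replicate (n - 1).toNat (0 : Int))
     let k := (W : Int) - 1
     let cur0 := (PySem.List.slice hits none (some k)).sum
     let st := (PySem.List.pyRange 1 ((n - 1) - k + 1) 1).foldl
       (fun (st : Int × List Int) i =>
         let cur := st.1 - PySem.List.pyGetD hits (i - 1) 0 + PySem.List.pyGetD hits (i + k - 1) 0
         (cur, st.2 ++ [cur]))
       (cur0, [cur0])
     st.2)
    =
    (let n : Int := (l.length : Int)
     let hits := (PySem.List.pyRange 0 (n - 1) 1).map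
       (fun i => if PySem.List.slice l (some i) (some (i + 2)) = d then (1 : Int) else 0)
     let pre := hits.foldl (fun p h => p ++ [PySem.List.pyGetD p (-1) 0 + h]) [(0 : Int)]
     (PySem.List.pyRange 0 (n - (W : Int) + 1) 1).map
       (fun j => PySem.List.pyGetD pre (j + (W : Int) - 1) 0 - PySem.List.pyGetD pre j 0)) := by
  simp only []
  have hN1 : 1 ≤ l.length := le_trans hW1 hWN
  have hn1 : (l.length : Int) - 1 = ((l.length - 1 : Nat) : Int) := by omega
  rw [hn1, PySem.List.pyRange_zero_natCast, List.foldl_map, List.map_map]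
  simp only [PySem.List.pySetD_natCast, Int.toNat_natCast, Function.comp_def]
  rw [pvSetFold (fun k => PySem.List.slice l (some (k:Int)) (some ((k:Int) + 2)) = d) (l.length - 1) (l.length - 1) le_rfl]
  simp only [Nat.sub_self, List.replicate_zero, List.append_nil]
  have hk1 : (W : Int) - 1 = ((W - 1 : Nat) : Int) := by omega
  rw [hk1, PySem.List.slice_to_natCast]
  have hloopb : ((l.length - 1 : Nat) : Int) - (((W - 1 : Nat) : Int)) + 1 = ((l.length - W + 1 : Nat) : Int) := by omega
  rw [hloopb, PySem.List.pyRange_one 1, List.foldl_map]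
  have hcnt : ((((l.length - W + 1 : Nat) : Int)) - 1).toNat = l.length - W := by omega
  rw [hcnt]
  have hlen : ((List.range (l.length - 1)).map (fun (k : Nat) => if PySem.List.slice l (some (k:Int)) (some ((k:Int) + 2)) = d then (1:Int) else 0)).length = l.length - 1 := by simp
  have hMb : ((l.length : Int)) - (W:Int) + 1 = ((l.length - W + 1 : Nat) : Int) := by omega
  rw [pvLoop ((List.range (l.length - 1)).map (fun (k : Nat) => if PySem.List.slice l (some (k:Int)) (some ((k:Int) + 2)) = d then (1:Int) else 0)) l.length W hlen hW1 hWN _ rfl (l.length - W) le_rfl]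
  simp only []
  rw [hMb, PySem.List.pyRange_zero_natCast, List.map_map]
  rw [pvFold_pre _ [0] (by simp)]
  apply List.map_congr_left
  intro J hJ
  have hJM : J < l.length - W + 1 := List.mem_range.mp hJ
  simp only [Function.comp]
  have hi1 : ((J : Nat) : Int) + (W : Int) - 1 = ((J + W - 1 : Nat) : Int) := by omega
  rw [hi1, PySem.List.pyGetD_natCast, PySem.List.pyGetD_natCast]
  have hgl : (List.getLast [(0:Int)] (by simp)) = 0 := rfl
  rw [hgl, List.singleton_append]
  rw [pvPre_getD _ (J + W - 1) (by simpa [hlen] using (by omega : J + W - 1 ≤ l.length - 1)),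
      pvPre_getD _ J (by simpa [hlen] using (by omega : J ≤ l.length - 1))]

-- ===== VERDICT (by name: the statement is the Claim_ definition above) =====
theorem rolling_dinuc_counts_spec : Claim_equal_rolling_dinuc_counts := by
  intro seq win dinuc _dom hpre
  unfold Spec_rolling_dinuc_counts rolling_dinuc_counts rolling_dinuc_counts_alt
  simp only []
  by_cases hlt : ((seq.toList.length : Int)) < win
  · rw [if_pos hlt, if_pos hlt]
    congr 1
    rw [PySem.List.foldl_ite_add_one
      (fun i => PySem.List.slice seq.toList (some i) (some (i + 2)) = dinuc.toList)]
    have hrw : (fun (i : Int) => if PySem.List.slice seq.toList (some i) (some (i + 2)) = dinuc.toList then (1:Int) else 0)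
        = (fun i => if (fun i => decide (PySem.List.slice seq.toList (some i) (some (i + 2)) = dinuc.toList)) i = true then (1:Int) else 0) := by
      funext i; simp
    rw [hrw, PySem.List.sum_map_ite_one_zero]
    simp
  · rw [if_neg hlt, if_neg hlt]
    by_cases hN0 : seq.toList.length = 0
    · have hw0 : win = 0 := by
        rcases hpre with h | ⟨_, hw⟩
        · exfalso; apply hlt; omega
        · exact hw
      have hl : seq.toList = [] := List.length_eq_zero_iff.mp hN0
      rw [hl, hw0]
      norm_num [PySem.List.pyRange_one_eq_nil, PySem.List.slice, PySem.List.clampIdx,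
        PySem.List.pyRange_one_singleton, PySem.List.pyGetD, PySem.List.pyGet?, PySem.List.pyIdx?]
      decide
    · have hw1 : 1 ≤ win := by
        rcases hpre with h | ⟨hs, _⟩
        · exact h
        · exact absurd (by rw [hs]; rfl) hN0
      obtain ⟨W, rfl⟩ : ∃ W : Nat, win = (W : Int) := ⟨win.toNat, by omega⟩
      exact pvMain seq.toList dinuc.toList W (by omega) (by omega)
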